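-- pv_equiv track=rewrite | github.com/gwct/turtle-genomics | scripts/get_window_stats.py | countUniqIdentSeqs
-- ===== SOURCE A (Python) =====
-- def countUniqIdentSeqs(seqs):
-- # This function goes through every sequence in an alignment and counts how
-- # many sequences are unique or identical.
--
--     uniq_seqs, ident_seqs, found = 0, 0, [];
--     seq_list_raw = list(seqs.values());
--     seq_list = [ seq.replace("-", "") for seq in seq_list_raw ];
--     for seq in seq_list:
--         if seq_list.count(seq) == 1:
--             uniq_seqs += 1;
--         if seq_list.count(seq) != 1 and seq not in found:
--             ident_seqs += 1;
--             found.append(seq);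
--
--     return uniq_seqs, ident_seqs;
-- ===== SOURCE B (Python) =====
-- def countUniqIdentSeqs(seqs):
-- # Sort the gap-stripped sequences, then count runs of equal adjacent strings
-- # in one linear pass: a run of length 1 is a unique sequence, a longer run is
-- # one group of identical sequences.
--     seq_list = sorted(seq.replace("-", "") for seq in seqs.values())
--     uniq_seqs, ident_seqs = 0, 0
--     i, n = 0, len(seq_list)
--     while i < n:
--         j = i + 1
--         while j < n and seq_list[j] == seq_list[i]:
--             j += 1
--         if j - i == 1:
--             uniq_seqs += 1
--         else:
--             ident_seqs += 1
--         i = j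
--     return uniq_seqs, ident_seqs
-- ===== Notes on version B (the rewrite author's own statement) =====
-- stated objective: faster
-- what changed: Replaced the quadratic loop that rescans the whole list with list.count on every element (plus a linear 'found' membership list) by sort-then-group: sort the gap-stripped sequences once and count runs of equal adjacent strings in a single pass.
import Mathlib
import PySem

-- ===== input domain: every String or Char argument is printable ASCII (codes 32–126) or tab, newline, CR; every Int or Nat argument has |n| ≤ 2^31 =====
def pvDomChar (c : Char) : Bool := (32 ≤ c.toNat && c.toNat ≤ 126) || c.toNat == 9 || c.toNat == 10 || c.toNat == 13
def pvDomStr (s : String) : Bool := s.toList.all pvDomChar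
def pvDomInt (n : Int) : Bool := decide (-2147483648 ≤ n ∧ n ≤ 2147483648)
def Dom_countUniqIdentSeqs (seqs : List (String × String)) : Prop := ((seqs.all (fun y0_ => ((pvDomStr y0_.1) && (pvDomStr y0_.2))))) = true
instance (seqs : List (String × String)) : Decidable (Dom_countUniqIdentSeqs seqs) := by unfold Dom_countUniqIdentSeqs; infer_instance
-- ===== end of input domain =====

-- B replaces A's quadratic count-rescan loop by sort-then-group runs of equal adjacent strings; proved to return the same pair.


-- ===== PORT A =====
-- the body of A's for-loop: state (uniq_seqs, ident_seqs, found)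
def pvStepA (seq_list : List String) (st : Int × Int × List String) (seq : String) : Int × Int × List String :=
  let u := if PySem.List.count seq_list seq = 1 then st.1 + 1 else st.1
  if PySem.List.count seq_list seq ≠ 1 ∧ seq ∉ st.2.2 then (u, st.2.1 + 1, st.2.2 ++ [seq])
  else (u, st.2.1, st.2.2)

def countUniqIdentSeqs (seqs : List (String × String)) : Int × Int :=
  let seq_list_raw := seqs.map (fun kv => kv.2)          -- list(seqs.values())
  let seq_list := seq_list_raw.map (fun seq => PySem.Str.replace seq "-" "")
  let st := seq_list.foldl (pvStepA seq_list) (0, 0, [])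
  (st.1, st.2.1)

-- ===== PORT B =====
-- Source B's outer while-loop: the inner while that advances j over equal elements
-- is the takeWhile/dropWhile split of the remaining list (lst[i:]).
def pvRuns : List String → Int × Int
  | [] => (0, 0)
  | x :: xs =>
    let run := xs.takeWhile (fun y => y == x)
    let rest := xs.dropWhile (fun y => y == x)
    let r := pvRuns rest
    if run.length = 0 then (r.1 + 1, r.2) else (r.1, r.2 + 1)
termination_by l => l.length
decreasing_by
  simp only [List.length_cons]
  exact Nat.lt_succ_of_le (List.length_dropWhile_le _ _)

def countUniqIdentSeqs_alt (seqs : List (String × String)) : Int × Int :=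
  let seq_list := PySem.List.sorted ((seqs.map (fun kv => kv.2)).map
    (fun seq => PySem.Str.replace seq "-" "")) (fun s => s) false
  pvRuns seq_list

-- ===== PRECONDITION & SPEC =====
def Spec_countUniqIdentSeqs (seqs : List (String × String)) (out : Int × Int) : Prop := out = countUniqIdentSeqs_alt seqs
instance (seqs : List (String × String)) (out : Int × Int) : Decidable (Spec_countUniqIdentSeqs seqs out) := by unfold Spec_countUniqIdentSeqs; infer_instance

-- ===== CLAIM (what is proved, stated in full; the proofs are below) =====
def Claim_equal_countUniqIdentSeqs : Prop := ∀ (seqs : List (String × String)), Dom_countUniqIdentSeqs seqs → Spec_countUniqIdentSeqs seqs (countUniqIdentSeqs seqs)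

-- ===== LEMMAS AND PROOFS =====



-- A's loop computes: #elements whose count in l is 1, and the set of distinct duplicated prefix elements.
lemma foldA_char (l p : List String) :
    p.foldl (pvStepA l) (0, 0, []) =
      ((p.countP (fun a => l.count a == 1) : Int),
       ((PySem.Set.ofList (p.filter (fun a => !(l.count a == 1)))).length : Int),
       PySem.Set.ofList (p.filter (fun a => !(l.count a == 1)))) := by
  induction p using List.reverseRecOn with
  | nil => simp
  | append_singleton q x ih =>
    rw [List.foldl_append, ih]
    simp only [List.foldl_cons, List.foldl_nil, List.countP_append, List.filter_append]
    by_cases hc : List.count x l = 1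
    · simp [pvStepA, PySem.List.count_eq, hc]
    · by_cases hm : x ∈ PySem.Set.ofList (q.filter (fun a => !(l.count a == 1)))
      · simp [pvStepA, PySem.List.count_eq, hc, hm,
          PySem.Set.ofList_append_singleton, PySem.Set.add_of_mem]
      · simp [pvStepA, PySem.List.count_eq, hc, hm,
          PySem.Set.ofList_append_singleton, PySem.Set.add_of_not_mem]

-- in a sorted list, everything equal to the head sits in its front run
lemma not_mem_dropWhile_sorted (x : String) (xs : List String) :
    (∀ z ∈ xs, x ≤ z) → xs.Pairwise (· ≤ ·) → x ∉ xs.dropWhile (fun y => y == x) := by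
  induction xs with
  | nil => simp
  | cons y ys ih =>
    intro hle hp
    by_cases hy : y = x
    · rw [List.dropWhile_cons_of_pos (by simp [hy])]
      exact ih (fun z hz => hle z (by simp [hz])) hp.of_cons
    · rw [List.dropWhile_cons_of_neg (by simp [hy])]
      intro hmem
      rcases List.mem_cons.mp hmem with h | h
      · exact hy h.symm
      · have h1 : x < y := lt_of_le_of_ne (hle y (by simp)) fun e => hy e.symm
        have h2 : y ≤ x := (List.pairwise_cons.mp hp).1 x h
        exact absurd (lt_of_lt_of_le h1 h2) (lt_irrefl x)

-- set(x-block ++ rf) when the block is all x's and x is not in rf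
lemma ofList_const_append (x : String) (run rf : List String)
    (hrun : ∀ y ∈ run, y = x) (hnx : x ∉ rf) :
    PySem.Set.ofList ((x :: run) ++ rf) = x :: PySem.Set.ofList rf := by
  have h1 : PySem.Set.ofList (x :: run) = [x] := by
    rw [PySem.Set.ofList_cons]
    have : (PySem.Set.ofList run).discard x = [] := by
      apply List.eq_nil_iff_forall_not_mem.mpr
      intro y hy
      have h := (PySem.Set.mem_discard _ _ _).mp hy
      exact h.2 (hrun y ((PySem.Set.mem_ofList _ _).mp h.1))
    rw [this]
  rw [PySem.Set.ofList_append, h1, PySem.Set.update_eq_append_filter]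
  have : (PySem.Set.ofList rf).filter (fun y => !(PySem.Set.contains [x] y)) = PySem.Set.ofList rf := by
    apply List.filter_eq_self.mpr
    intro y hy
    have hyx : y ≠ x := fun e => hnx (e ▸ (PySem.Set.mem_ofList _ _).mp hy)
    simp [PySem.Set.contains_eq_listContains, hyx]
  rw [this]
  rfl

-- on a sorted list, grouping runs computes the same two quantities (relative to itself)
lemma pvRuns_char_aux : ∀ (n : Nat) (s : List String), s.length ≤ n → s.Pairwise (· ≤ ·) →
    pvRuns s = ((s.countP (fun a => s.count a == 1) : Int),
                ((PySem.Set.ofList (s.filter (fun a => !(s.count a == 1)))).length : Int)) := by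
  intro n
  induction n with
  | zero =>
    intro s hlen _
    have : s = [] := List.eq_nil_of_length_eq_zero (Nat.le_zero.mp hlen)
    subst this; simp [pvRuns]
  | succ n ih =>
    intro s hlen hs
    match s with
    | [] => simp [pvRuns]
    | x :: xs =>
      have hpair := List.pairwise_cons.mp hs
      have hxle : ∀ z ∈ xs, x ≤ z := hpair.1
      have hpxs : xs.Pairwise (· ≤ ·) := hpair.2
      have hsplit : xs.takeWhile (fun y => y == x) ++ xs.dropWhile (fun y => y == x) = xs :=
        List.takeWhile_append_dropWhile
      set run := xs.takeWhile (fun y => y == x) with hrundef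
      set rest := xs.dropWhile (fun y => y == x) with hrestdef
      have hrun : ∀ y ∈ run, y = x := by
        intro y hy
        have := List.mem_takeWhile_imp hy
        simpa using this
      have hxrest : x ∉ rest := not_mem_dropWhile_sorted x xs hxle hpxs
      have hprest : rest.Pairwise (· ≤ ·) := hpxs.sublist (List.dropWhile_sublist _)
      have hPsplit : ∀ P : String → Bool, xs.countP P = run.countP P + rest.countP P := by
        intro P
        conv_lhs => rw [← hsplit]
        exact List.countP_append
      have hFsplit : ∀ P : String → Bool, xs.filter P = run.filter P ++ rest.filter P := by
        intro P
        conv_lhs => rw [← hsplit]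
        exact List.filter_append run rest
      have hCsplit : ∀ y : String, xs.count y = run.count y + rest.count y := by
        intro y
        conv_lhs => rw [← hsplit]
        exact List.count_append
      have hcx : (x :: xs).count x = run.length + 1 := by
        rw [List.count_cons_self, hCsplit, List.count_eq_zero.mpr hxrest,
          List.count_eq_length.mpr (fun b hb => (hrun b hb).symm)]
      have hcz : ∀ z ∈ rest, (x :: xs).count z = rest.count z := by
        intro z hz
        have hzx : z ≠ x := fun e => hxrest (e ▸ hz)
        have hzrun : z ∉ run := fun h => hzx (hrun z h)
        rw [List.count_cons_of_ne hzx.symm, hCsplit, List.count_eq_zero.mpr hzrun, Nat.zero_add]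
      have hcountrun : run.countP (fun a => (x :: xs).count a == 1) = 0 := by
        rcases List.eq_nil_or_concat run with h | ⟨ys, y, hcat⟩
        · rw [h]; rfl
        · apply List.countP_eq_zero.mpr
          intro a ha
          rw [hrun a ha, hcx]
          have hlen1 : 1 ≤ run.length := by rw [hcat]; simp
          simp only [beq_iff_eq]
          omega
      have hcountP : (x :: xs).countP (fun a => (x :: xs).count a == 1)
          = (if run.length = 0 then 1 else 0) + rest.countP (fun a => rest.count a == 1) := by
        have hcrest : rest.countP (fun a => (x :: xs).count a == 1)
            = rest.countP (fun a => rest.count a == 1) :=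
          List.countP_congr (fun z hz => by rw [hcz z hz])
        rw [List.countP_cons, hPsplit, hcountrun, hcrest, hcx]
        simp only [beq_iff_eq]
        split_ifs <;> omega
      have hfilter : (x :: xs).filter (fun a => !((x :: xs).count a == 1))
          = (if run.length = 0 then [] else x :: run)
            ++ rest.filter (fun a => !(rest.count a == 1)) := by
        have hfrest : rest.filter (fun a => !((x :: xs).count a == 1))
            = rest.filter (fun a => !(rest.count a == 1)) :=
          List.filter_congr (fun z hz => by rw [hcz z hz])
        rw [List.filter_cons, hFsplit, hfrest]
        by_cases h0 : run.length = 0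
        · have he : run = [] := List.eq_nil_of_length_eq_zero h0
          rw [he] at hcx ⊢
          simp [hcx]
        · have hall : run.filter (fun a => !((x :: xs).count a == 1)) = run := by
            apply List.filter_eq_self.mpr
            intro a ha
            rw [hrun a ha, hcx]
            simp
            intro hre
            exact h0 (by rw [hre]; rfl)
          rw [hall, hcx]
          simp [h0]
      have hofl : (PySem.Set.ofList ((x :: xs).filter (fun a => !((x :: xs).count a == 1)))).length
          = (if run.length = 0 then 0 else 1)
            + (PySem.Set.ofList (rest.filter (fun a => !(rest.count a == 1)))).length := by
        rw [hfilter]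
        by_cases h0 : run.length = 0
        · simp [h0]
        · rw [if_neg h0, if_neg h0,
            ofList_const_append x run _ hrun
              (fun h => hxrest (List.mem_of_mem_filter h))]
          simp [Nat.add_comm]
      have hrestlen : rest.length ≤ n := by
        have h1 : rest.length ≤ xs.length := (List.dropWhile_sublist _).length_le
        have h2 : xs.length ≤ n := by simpa using Nat.lt_succ_iff.mp (Nat.lt_of_lt_of_le (by simp) hlen)
        omega
      have hIH := ih rest hrestlen hprest
      rw [pvRuns, ← hrundef, ← hrestdef, hIH, hcountP, hofl]
      by_cases h0 : run.length = 0 <;> simp [h0] <;> ring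

lemma length_ofList_perm {a b : List String} (h : a.Perm b) :
    (PySem.Set.ofList a).length = (PySem.Set.ofList b).length := by
  have hp : (PySem.Set.ofList a).Perm (PySem.Set.ofList b) :=
    (List.perm_ext_iff_of_nodup (PySem.Set.nodup_ofList a) (PySem.Set.nodup_ofList b)).mpr
      (fun y => by simp [PySem.Set.mem_ofList, h.mem_iff])
  exact hp.length_eq

-- ===== VERDICT (by name: the statement is the Claim_ definition above) =====
theorem countUniqIdentSeqs_spec : Claim_equal_countUniqIdentSeqs := by
  intro seqs _
  unfold Spec_countUniqIdentSeqs countUniqIdentSeqs countUniqIdentSeqs_alt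
  dsimp only
  rw [foldA_char]
  set l := (seqs.map (fun kv => kv.2)).map (fun seq => PySem.Str.replace seq "-" "") with hl
  set s := PySem.List.sorted l (fun s => s) false with hsdef
  have hpair : s.Pairwise (· ≤ ·) := by
    simpa using PySem.List.sorted_pairwise l (fun s => s)
  have hperm : s.Perm l := PySem.List.sorted_perm l (fun s => s) false
  rw [pvRuns_char_aux s.length s (le_refl _) hpair]
  have hcnt : ∀ a, s.count a = l.count a := hperm.count_eq
  have hcountP : s.countP (fun a => s.count a == 1) = l.countP (fun a => l.count a == 1) := by
    rw [List.countP_congr (fun a _ => by rw [hcnt a])]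
    exact hperm.countP_eq _
  have hfilt : (s.filter (fun a => !(s.count a == 1))).Perm (l.filter (fun a => !(l.count a == 1))) := by
    rw [List.filter_congr (fun a _ => by rw [hcnt a])]
    exact hperm.filter _
  rw [hcountP, length_ofList_perm hfilt]
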